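-- pv_equiv track=rewrite | github.com/Kaminarusawa-sekai/Flora-evaluation | api_normalization/capability_extractor.py | _infer_lifecycle
-- ===== SOURCE A (Python) =====
-- from typing import List, Dict, Any, Optional, Set
--
-- def _infer_lifecycle(apis: List[Dict[str, Any]]) -> Dict[str, Any]:
--     """Infer entity lifecycle from available operations."""
--     methods = {api.get('method') for api in apis}
--     action_verbs = {api.get('action_verb', '').lower() for api in apis if api.get('action_verb')}
--
--     lifecycle = {
--         'has_create': 'POST' in methods or 'create' in action_verbs,
--         'has_read': 'GET' in methods or 'get' in action_verbs or 'list' in action_verbs,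
--         'has_update': 'PUT' in methods or 'PATCH' in methods or 'update' in action_verbs,
--         'has_delete': 'DELETE' in methods or 'delete' in action_verbs,
--         'is_complete_crud': False
--     }
--
--     lifecycle['is_complete_crud'] = all([
--         lifecycle['has_create'],
--         lifecycle['has_read'],
--         lifecycle['has_update'],
--         lifecycle['has_delete']
--     ])
--
--     return lifecycle
-- ===== SOURCE B (Python) =====
-- def _infer_lifecycle(apis):
--     """Infer entity lifecycle from available operations (single pass, boolean fold)."""
--     has_create = has_read = has_update = has_delete = False
--     for api in apis:
--         m = api.get('method')
--         v = api.get('action_verb', '').lower()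
--         has_create = has_create or m == 'POST' or v == 'create'
--         has_read = has_read or m == 'GET' or v == 'get' or v == 'list'
--         has_update = has_update or m == 'PUT' or m == 'PATCH' or v == 'update'
--         has_delete = has_delete or m == 'DELETE' or v == 'delete'
--     return {
--         'has_create': has_create,
--         'has_read': has_read,
--         'has_update': has_update,
--         'has_delete': has_delete,
--         'is_complete_crud': has_create and has_read and has_update and has_delete,
--     }
-- ===== Notes on version B (the rewrite author's own statement) =====
-- stated objective: simpler
-- what changed: Replaces the two intermediate sets (methods, lowercased action verbs) and membership tests with a single pass over apis that ORs the four lifecycle flags directly, computing is_complete_crud as their conjunction.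
import Mathlib
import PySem

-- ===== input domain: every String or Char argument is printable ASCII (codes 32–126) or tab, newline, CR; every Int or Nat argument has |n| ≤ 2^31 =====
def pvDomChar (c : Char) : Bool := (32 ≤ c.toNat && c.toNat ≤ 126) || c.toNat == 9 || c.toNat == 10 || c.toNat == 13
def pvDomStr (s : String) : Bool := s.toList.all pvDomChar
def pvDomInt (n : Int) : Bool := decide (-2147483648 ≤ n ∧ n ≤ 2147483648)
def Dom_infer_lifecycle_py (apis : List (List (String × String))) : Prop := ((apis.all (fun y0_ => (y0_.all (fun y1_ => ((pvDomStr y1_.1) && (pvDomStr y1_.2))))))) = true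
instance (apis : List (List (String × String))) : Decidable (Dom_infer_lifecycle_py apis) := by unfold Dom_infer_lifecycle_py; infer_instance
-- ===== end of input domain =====

-- B replaces A's two intermediate sets and membership tests by a single pass that ORs the four lifecycle flags directly (objective: simpler).


-- ===== PORT A =====
def infer_lifecycle_py (apis : List (List (String × String))) : List (String × Bool) :=
  let methods : PySem.Set (Option String) :=
    PySem.Set.ofList (apis.map (fun api => PySem.Dict.get? (PySem.Dict.mk api) "method"))
  let action_verbs : PySem.Set String :=
    PySem.Set.ofList
      ((apis.filter (fun api => !(PySem.Dict.getD (PySem.Dict.mk api) "action_verb" "" == ""))).map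
        (fun api => PySem.Str.lower (PySem.Dict.getD (PySem.Dict.mk api) "action_verb" "")))
  let lifecycle : PySem.Dict String Bool := PySem.Dict.mk [
    ("has_create", methods.contains (some "POST") || action_verbs.contains "create"),
    ("has_read", methods.contains (some "GET") || action_verbs.contains "get" || action_verbs.contains "list"),
    ("has_update", methods.contains (some "PUT") || methods.contains (some "PATCH") || action_verbs.contains "update"),
    ("has_delete", methods.contains (some "DELETE") || action_verbs.contains "delete"),
    ("is_complete_crud", false)]
  let lifecycle := lifecycle.insert "is_complete_crud"
    ([PySem.Dict.getD lifecycle "has_create" false,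
      PySem.Dict.getD lifecycle "has_read" false,
      PySem.Dict.getD lifecycle "has_update" false,
      PySem.Dict.getD lifecycle "has_delete" false].all id)
  lifecycle.items

-- ===== PORT B =====
def infer_lifecycle_py_alt (apis : List (List (String × String))) : List (String × Bool) :=
  let st := apis.foldl
    (fun (st : Bool × Bool × Bool × Bool) api =>
      let m := PySem.Dict.get? (PySem.Dict.mk api) "method"
      let v := PySem.Str.lower (PySem.Dict.getD (PySem.Dict.mk api) "action_verb" "")
      (st.1 || m == some "POST" || v == "create",
       st.2.1 || m == some "GET" || v == "get" || v == "list",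
       st.2.2.1 || m == some "PUT" || m == some "PATCH" || v == "update",
       st.2.2.2 || m == some "DELETE" || v == "delete"))
    (false, false, false, false)
  [("has_create", st.1), ("has_read", st.2.1), ("has_update", st.2.2.1), ("has_delete", st.2.2.2),
   ("is_complete_crud", st.1 && st.2.1 && st.2.2.1 && st.2.2.2)]

-- ===== PRECONDITION & SPEC =====
def Spec_infer_lifecycle_py (apis : List (List (String × String))) (out : List (String × Bool)) : Prop := out = infer_lifecycle_py_alt apis
instance (apis : List (List (String × String))) (out : List (String × Bool)) : Decidable (Spec_infer_lifecycle_py apis out) := by unfold Spec_infer_lifecycle_py; infer_instance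

-- ===== CLAIM (what is proved, stated in full; the proofs are below) =====
def Claim_equal_infer_lifecycle_py : Prop := ∀ (apis : List (List (String × String))), Dom_infer_lifecycle_py apis → Spec_infer_lifecycle_py apis (infer_lifecycle_py apis)

-- ===== LEMMAS AND PROOFS =====

-- the four per-element flag predicates shared by the proof
def pvC (api : List (String × String)) : Bool :=
  (PySem.Dict.get? (PySem.Dict.mk api) "method" == some "POST") ||
  (PySem.Str.lower (PySem.Dict.getD (PySem.Dict.mk api) "action_verb" "") == "create")
def pvR (api : List (String × String)) : Bool :=
  (PySem.Dict.get? (PySem.Dict.mk api) "method" == some "GET") ||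
  (PySem.Str.lower (PySem.Dict.getD (PySem.Dict.mk api) "action_verb" "") == "get") ||
  (PySem.Str.lower (PySem.Dict.getD (PySem.Dict.mk api) "action_verb" "") == "list")
def pvU (api : List (String × String)) : Bool :=
  (PySem.Dict.get? (PySem.Dict.mk api) "method" == some "PUT") ||
  (PySem.Dict.get? (PySem.Dict.mk api) "method" == some "PATCH") ||
  (PySem.Str.lower (PySem.Dict.getD (PySem.Dict.mk api) "action_verb" "") == "update")
def pvD (api : List (String × String)) : Bool :=
  (PySem.Dict.get? (PySem.Dict.mk api) "method" == some "DELETE") ||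
  (PySem.Str.lower (PySem.Dict.getD (PySem.Dict.mk api) "action_verb" "") == "delete")

-- B's fold computes (any pvC, any pvR, any pvU, any pvD)
lemma pvFold (l : List (List (String × String))) (a b c d : Bool) :
    l.foldl
      (fun (st : Bool × Bool × Bool × Bool) api =>
        let m := PySem.Dict.get? (PySem.Dict.mk api) "method"
        let v := PySem.Str.lower (PySem.Dict.getD (PySem.Dict.mk api) "action_verb" "")
        (st.1 || m == some "POST" || v == "create",
         st.2.1 || m == some "GET" || v == "get" || v == "list",
         st.2.2.1 || m == some "PUT" || m == some "PATCH" || v == "update",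
         st.2.2.2 || m == some "DELETE" || v == "delete"))
      (a, b, c, d)
    = (a || l.any pvC, b || l.any pvR, c || l.any pvU, d || l.any pvD) := by
  induction l generalizing a b c d with
  | nil => simp
  | cons x xs ih => rw [List.foldl_cons, ih]; simp [pvC, pvR, pvU, pvD, Bool.or_assoc]

-- set membership over a mapped list is List.any  (no such lemma in Mathlib/PySem)
lemma pvContains_map {alpha : Type} (l : List (List (String × String)))
    (f : List (String × String) → alpha) [BEq alpha] [LawfulBEq alpha] (x : alpha) :
    (PySem.Set.ofList (l.map f)).contains x = l.any (fun a => f a == x) := by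
  rw [Bool.eq_iff_iff, PySem.Set.contains_iff]
  simp only [PySem.Set.mem_ofList, List.mem_map, List.any_eq_true, beq_iff_eq]

-- verb membership: the truthiness filter is absorbed because '' never lowercases to a nonempty verb
lemma pvVerb_contains (l : List (List (String × String))) (v : String) (hv : v ≠ "") :
    ((PySem.Set.ofList
      ((l.filter (fun api => !(PySem.Dict.getD (PySem.Dict.mk api) "action_verb" "" == ""))).map
        (fun api => PySem.Str.lower (PySem.Dict.getD (PySem.Dict.mk api) "action_verb" "")))).contains v)
    = l.any (fun api => PySem.Str.lower (PySem.Dict.getD (PySem.Dict.mk api) "action_verb" "") == v) := by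
  rw [Bool.eq_iff_iff, PySem.Set.contains_iff]
  simp only [PySem.Set.mem_ofList, List.mem_map, List.mem_filter, List.any_eq_true, beq_iff_eq,
    Bool.not_eq_eq_eq_not, Bool.not_true, beq_eq_false_iff_ne, ne_eq]
  constructor
  · rintro ⟨a, ⟨ha, -⟩, h2⟩; exact ⟨a, ha, h2⟩
  · rintro ⟨a, ha, h2⟩
    refine ⟨a, ⟨ha, ?_⟩, h2⟩
    intro h0
    apply hv
    rw [h0] at h2
    simpa using h2.symm

-- A's dict construction and in-place overwrite of 'is_complete_crud', on arbitrary flag values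
lemma pvA_items (b1 b2 b3 b4 : Bool) :
  ((PySem.Dict.mk [("has_create",b1),("has_read",b2),("has_update",b3),("has_delete",b4),("is_complete_crud",false)]).insert "is_complete_crud"
     ([PySem.Dict.getD (PySem.Dict.mk [("has_create",b1),("has_read",b2),("has_update",b3),("has_delete",b4),("is_complete_crud",false)]) "has_create" false,
       PySem.Dict.getD (PySem.Dict.mk [("has_create",b1),("has_read",b2),("has_update",b3),("has_delete",b4),("is_complete_crud",false)]) "has_read" false,
       PySem.Dict.getD (PySem.Dict.mk [("has_create",b1),("has_read",b2),("has_update",b3),("has_delete",b4),("is_complete_crud",false)]) "has_update" false,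
       PySem.Dict.getD (PySem.Dict.mk [("has_create",b1),("has_read",b2),("has_update",b3),("has_delete",b4),("is_complete_crud",false)]) "has_delete" false].all id)).items
  = [("has_create",b1),("has_read",b2),("has_update",b3),("has_delete",b4),("is_complete_crud", b1 && b2 && b3 && b4)] := by
  cases b1 <;> cases b2 <;> cases b3 <;> cases b4 <;> rfl

-- any distributes over pointwise || (not in Mathlib under this name)
lemma pvAny_or {alpha : Type} (l : List alpha) (p q : alpha → Bool) :
    (l.any fun a => p a || q a) = (l.any p || l.any q) := by
  induction l with
  | nil => rfl
  | cons x xs ih => simp [ih, Bool.or_assoc, Bool.or_left_comm]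

-- ===== VERDICT (by name: the statement is the Claim_ definition above) =====
theorem infer_lifecycle_py_spec : Claim_equal_infer_lifecycle_py := by
  intro apis _
  unfold Spec_infer_lifecycle_py infer_lifecycle_py infer_lifecycle_py_alt
  rw [pvFold]
  simp only [pvA_items, pvContains_map,
    pvVerb_contains apis "create" (by decide), pvVerb_contains apis "get" (by decide),
    pvVerb_contains apis "list" (by decide), pvVerb_contains apis "update" (by decide),
    pvVerb_contains apis "delete" (by decide), Bool.false_or]
  unfold pvC pvR pvU pvD
  simp only [pvAny_or]
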